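-- pv_equiv track=rewrite | github.com/SonyaMih/OPG_List_Tree | Sorty/sorts_mihalikova_zadanie.py | insertion_binary_sort
-- ===== SOURCE A (Python) =====
-- def binary_search(arr, key, start, end, comparisons):
--     if start == end:
--         comparisons += 1
--         if arr[start] > key:
--             return start, comparisons
--         else:
--             return start + 1, comparisons
--     if start > end:
--         return start, comparisons
--
--     mid = (start + end) // 2
--     comparisons += 1
--     if arr[mid] < key:
--         return binary_search(arr, key, mid + 1, end, comparisons)
--     elif arr[mid] > key:
--         return binary_search(arr, key, start, mid - 1, comparisons)
--     else:
--         return mid + 1, comparisons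
--
-- def insertion_binary_sort(arr):
--     comparisons = 0
--     assignments = 0
--     for i in range(1, len(arr)):
--         key = arr[i]
--         assignments += 1
--         pos, comparisons = binary_search(arr, key, 0, i - 1, comparisons)
--         arr[pos + 1:i + 1] = arr[pos:i]
--         assignments += (i - pos)
--         arr[pos] = key
--         assignments += 1
--     return arr, comparisons, assignments
-- ===== SOURCE B (Python) =====
-- def insertion_binary_sort(arr):
--     # Same result and counts as A; mutates arr in place like A (final state identical).
--     comparisons = 0
--     assignments = 0
--     res = arr[:1]
--     for key in arr[1:]:
--         i = len(res)
--         assignments += 1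
--         lo, hi = 0, i - 1
--         while lo <= hi:
--             comparisons += 1
--             if lo == hi:
--                 lo = lo if res[lo] > key else lo + 1
--                 break
--             mid = (lo + hi) // 2
--             if res[mid] < key:
--                 lo = mid + 1
--             elif res[mid] > key:
--                 hi = mid - 1
--             else:
--                 lo = mid + 1
--                 break
--         pos = lo
--         res.insert(pos, key)
--         assignments += (i - pos) + 1
--     arr[:] = res
--     return arr, comparisons, assignments
-- ===== Notes on version B (the rewrite author's own statement) =====
-- stated objective: alternative
-- what changed: A's recursive binary_search is replaced by an iterative lo/hi while-loop, and instead of triple-slice surgery on the full array each insertion grows the sorted prefix as a separate list with list.insert; comparison/assignment counts come from the same counting discipline and are identical.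
import Mathlib
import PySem

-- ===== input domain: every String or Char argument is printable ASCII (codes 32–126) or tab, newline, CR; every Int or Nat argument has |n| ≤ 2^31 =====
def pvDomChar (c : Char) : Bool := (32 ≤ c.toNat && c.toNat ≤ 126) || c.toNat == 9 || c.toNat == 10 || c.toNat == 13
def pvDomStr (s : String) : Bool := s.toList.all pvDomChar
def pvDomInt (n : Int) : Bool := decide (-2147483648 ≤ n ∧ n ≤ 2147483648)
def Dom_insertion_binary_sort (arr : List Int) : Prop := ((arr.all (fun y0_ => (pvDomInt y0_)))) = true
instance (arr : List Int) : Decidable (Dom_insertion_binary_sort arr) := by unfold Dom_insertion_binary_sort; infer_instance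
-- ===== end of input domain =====

-- B replaces A's recursive binary_search by an iterative while-loop and grows a result
-- list by list.insert instead of slice-surgery on the full array (objective: alternative
-- decomposition, same cost). Both A and B mutate arr in place identically; the theorems
-- are about the return value.

-- ===== PORT A =====
-- Literal port of A's recursive binary_search; `fuel` is only a totality guard
-- ((e-s).toNat+2 is always enough, the 0-case is never reached on calls made below).
def binary_searchA (fuel : Nat) (arr : List Int) (key s e c : Int) : Int × Int :=
  match fuel with
  | 0 => (s, c)
  | fuel + 1 =>
    if s = e then
      if PySem.List.pyGetD arr s 0 > key then (s, c + 1) else (s + 1, c + 1)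
    else if s > e then (s, c)
    else
      let mid := PySem.Int.floordiv (s + e) 2
      if PySem.List.pyGetD arr mid 0 < key then binary_searchA fuel arr key (mid + 1) e (c + 1)
      else if PySem.List.pyGetD arr mid 0 > key then binary_searchA fuel arr key s (mid - 1) (c + 1)
      else (mid + 1, c + 1)

-- the body of A's `for i in range(1, len(arr))` loop; state = (arr, comparisons, assignments)
def insertion_binary_sort_stepA (st : List Int × Int × Int) (i : Int) : List Int × Int × Int :=
  let a := st.1
  let key := PySem.List.pyGetD a i 0
  let asg := st.2.2 + 1
  let pc := binary_searchA ((i - 1).toNat + 2) a key 0 (i - 1) st.2.1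
  let pos := pc.1
  -- arr[pos+1:i+1] = arr[pos:i]   (RHS evaluated first; lengths are equal here)
  let a' := PySem.List.slice a (some 0) (some (pos + 1)) ++ PySem.List.slice a (some pos) (some i)
              ++ PySem.List.slice a (some (i + 1)) none
  let asg := asg + (i - pos)
  -- arr[pos] = key
  let a'' := PySem.List.pySetD a' pos key
  (a'', pc.2, asg + 1)

def insertion_binary_sort (arr : List Int) : List Int × Int × Int :=
  let n : Int := arr.length
  (PySem.List.pyRange 1 n 1).foldl insertion_binary_sort_stepA (arr, 0, 0)

-- ===== PORT B =====
-- the iterative while-loop of Source B (lo/hi narrowing); `fuel` is only a totality guard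
def bsearch_loop (fuel : Nat) (res : List Int) (key lo hi c : Int) : Int × Int :=
  match fuel with
  | 0 => (lo, c)
  | fuel + 1 =>
    if lo ≤ hi then
      let c := c + 1
      if lo = hi then
        (if PySem.List.pyGetD res lo 0 > key then lo else lo + 1, c)
      else
        let mid := PySem.Int.floordiv (lo + hi) 2
        if PySem.List.pyGetD res mid 0 < key then bsearch_loop fuel res key (mid + 1) hi c
        else if PySem.List.pyGetD res mid 0 > key then bsearch_loop fuel res key lo (mid - 1) c
        else (mid + 1, c)
    else (lo, c)

-- the body of Source B's `for key in arr[1:]` loop; state = (res, comparisons, assignments)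
def insertion_binary_sort_stepB (st : List Int × Int × Int) (key : Int) : List Int × Int × Int :=
  let res := st.1
  let i : Int := res.length
  let asg := st.2.2 + 1
  let pc := bsearch_loop ((i - 1).toNat + 2) res key 0 (i - 1) st.2.1
  let pos := pc.1
  (PySem.List.insert res pos key, pc.2, asg + (i - pos) + 1)

def insertion_binary_sort_alt (arr : List Int) : List Int × Int × Int :=
  let st := (PySem.List.slice arr (some 1) none).foldl insertion_binary_sort_stepB
              (PySem.List.slice arr none (some 1), 0, 0)
  (st.1, st.2.1, st.2.2)

-- ===== PRECONDITION & SPEC =====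
def Spec_insertion_binary_sort (arr : List Int) (out : List Int × Int × Int) : Prop := out = insertion_binary_sort_alt arr
instance (arr : List Int) (out : List Int × Int × Int) : Decidable (Spec_insertion_binary_sort arr out) := by unfold Spec_insertion_binary_sort; infer_instance

-- ===== CLAIM (what is proved, stated in full; the proofs are below) =====
def Claim_equal_insertion_binary_sort : Prop := ∀ (arr : List Int), Dom_insertion_binary_sort arr → Spec_insertion_binary_sort arr (insertion_binary_sort arr)

-- ===== LEMMAS AND PROOFS =====

-- A's recursion and B's loop compute the same (position, comparison-count), step for step.
theorem bsA_eq_bsB (fuel : Nat) : ∀ (arr : List Int) (key s e c : Int),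
    binary_searchA fuel arr key s e c = bsearch_loop fuel arr key s e c := by
  induction fuel with
  | zero => intro arr key s e c; rfl
  | succ fuel ih =>
    intro arr key s e c
    by_cases h1 : s = e
    · simp [binary_searchA, bsearch_loop, h1]
      split_ifs <;> rfl
    · by_cases h2 : s > e
      · simp [binary_searchA, bsearch_loop, h1, h2, not_le.mpr h2]
      · simp [binary_searchA, bsearch_loop, h1, h2, le_of_not_gt h2, ih]

-- the returned insertion position lies in [s, e+1]
theorem bsB_pos_bounds (fuel : Nat) : ∀ (res : List Int) (key s e c : Int),
    0 ≤ s → s ≤ e + 1 →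
    s ≤ (bsearch_loop fuel res key s e c).1 ∧ (bsearch_loop fuel res key s e c).1 ≤ e + 1 := by
  induction fuel with
  | zero => intro res key s e c h0 h1; exact ⟨le_refl _, h1⟩
  | succ fuel ih =>
    intro res key s e c h0 h1
    by_cases hle : s ≤ e
    · by_cases heq : s = e
      · simp only [bsearch_loop, if_pos hle, if_pos heq]
        split_ifs <;> omega
      · have hlt : s < e := lt_of_le_of_ne hle heq
        have hmid := PySem.Int.floordiv_two_mid_bounds hle
        set mid := PySem.Int.floordiv (s + e) 2 with hm
        have hmid2 : mid < e := by
          have := PySem.Int.floordiv_two_mid_bounds (le_of_lt hlt)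
          -- mid ≤ (s+e)/2 < e since s < e: floordiv (s+e) 2 ≤ (e-1+e)/2 < e
          have h2 : PySem.Int.floordiv (s + e) 2 ≤ PySem.Int.floordiv (e - 1 + e) 2 := by
            rw [PySem.Int.floordiv_eq_ediv_of_pos (by norm_num),
                PySem.Int.floordiv_eq_ediv_of_pos (by norm_num)]
            exact Int.ediv_le_ediv (by norm_num) (by omega)
          have h3 : PySem.Int.floordiv (e - 1 + e) 2 < e := by
            rw [PySem.Int.floordiv_eq_ediv_of_pos (by norm_num)]
            omega
          omega
        simp only [bsearch_loop, if_pos hle, if_neg heq, ← hm]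
        split_ifs with hc1 hc2
        · have := ih res key (mid + 1) e (c + 1) (by omega) (by omega)
          constructor <;> omega
        · have := ih res key s (mid - 1) (c + 1) h0 (by omega)
          constructor <;> omega
        · constructor <;> omega
    · simp only [bsearch_loop, if_neg hle]
      omega

-- the loop only probes indices < res.length, so a suffix appended after res is invisible
theorem bsB_append (fuel : Nat) : ∀ (res suf : List Int) (key s e c : Int),
    0 ≤ s → e < (res.length : Int) →
    bsearch_loop fuel (res ++ suf) key s e c = bsearch_loop fuel res key s e c := by
  induction fuel with
  | zero => intro res suf key s e c h0 h1; rfl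
  | succ fuel ih =>
    intro res suf key s e c h0 h1
    by_cases hle : s ≤ e
    · have hget : ∀ j : Int, 0 ≤ j → j < (res.length : Int) →
          PySem.List.pyGetD (res ++ suf) j 0 = PySem.List.pyGetD res j 0 := by
        intro j hj0 hj1
        rw [PySem.List.pyGetD_eq_getElem _ _ hj0 (by simp; omega),
            PySem.List.pyGetD_eq_getElem _ _ hj0 hj1,
            List.getElem_append_left (by omega)]
      by_cases heq : s = e
      · simp only [bsearch_loop, if_pos hle, if_pos heq,
          hget s h0 (by omega)]
      · have hlt : s < e := lt_of_le_of_ne hle heq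
        have hmid := PySem.Int.floordiv_two_mid_bounds hle
        set mid := PySem.Int.floordiv (s + e) 2 with hm
        simp only [bsearch_loop, if_pos hle, if_neg heq, ← hm,
          hget mid (by omega) (by omega)]
        split_ifs
        · exact ih res suf key (mid + 1) e (c + 1) (by omega) h1
        · exact ih res suf key s (mid - 1) (c + 1) h0 (by omega)
        · rfl
    · simp only [bsearch_loop, if_neg hle]

-- A's slice assignment + element write on (res ++ k :: suf) is insertion into res
theorem surgery_eq (res suf : List Int) (k : Int) (pos : Int)
    (h0 : 0 ≤ pos) (h1 : pos ≤ (res.length : Int)) :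
    PySem.List.pySetD
      (PySem.List.slice (res ++ k :: suf) (some 0) (some (pos + 1)) ++
       PySem.List.slice (res ++ k :: suf) (some pos) (some (res.length : Int)) ++
       PySem.List.slice (res ++ k :: suf) (some ((res.length : Int) + 1)) none)
      pos k
    = PySem.List.insert res pos k ++ suf := by
  set a := res ++ k :: suf with ha
  set p := pos.toNat with hp
  have hpos : pos = (p : Int) := by omega
  have hpl : p ≤ res.length := by omega
  have hlen : a.length = res.length + 1 + suf.length := by simp [ha]; omega
  rw [PySem.List.slice_toNat _ (by omega) (by omega),
      PySem.List.slice_toNat _ h0 (by omega),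
      PySem.List.slice_from _ (by omega),
      PySem.List.pySetD_of_nonneg _ _ h0]
  have e1 : ((pos + 1).toNat) = p + 1 := by omega
  have e2 : ((res.length : Int)).toNat = res.length := by omega
  have e3 : (((res.length : Int)) + 1).toNat = res.length + 1 := by omega
  rw [e1, e2, e3]
  simp only [Int.toNat_zero, Nat.sub_zero, List.drop_zero]
  have hS2 : (a.drop p).take (res.length - p) = res.drop p := by
    rw [ha, List.drop_append_of_le_length hpl]
    have hld : (res.drop p).length = res.length - p := by simp
    rw [List.take_append_of_le_length (le_of_eq hld.symm), ← hld, List.take_length]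
  have hS3 : a.drop (res.length + 1) = suf := by
    rw [ha, List.drop_append, List.drop_of_length_le (by omega : res.length ≤ res.length + 1)]
    have : res.length + 1 - res.length = 1 := by omega
    rw [this]
    simp
  have hS1len : (a.take (p + 1)).length = p + 1 := by
    rw [List.length_take]; omega
  have hgl : p < a.length := by omega
  have htp : a.take p = res.take p := by
    rw [ha, List.take_append_of_le_length hpl]
  have hltp : (a.take p).length = p := by rw [List.length_take]; omega
  have hsetS1 : (a.take (p + 1)).set p k = res.take p ++ [k] := by
    rw [List.take_add_one, List.getElem?_eq_getElem hgl]
    rw [List.set_append, if_neg (by rw [hltp]; omega)]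
    rw [hltp, htp]
    simp
  rw [hS2, hS3]
  rw [List.set_append, if_pos (by rw [List.length_append, hS1len]; omega)]
  rw [List.set_append, if_pos (by rw [hS1len]; omega)]
  rw [hsetS1, hpos, PySem.List.insert_natCast res p k hpl]
  simp

-- main loop invariant: A's fold over indices |res|..n-1 on (res ++ suf) tracks B's fold over suf
theorem main_loop_eq : ∀ (suf res : List Int) (c asg : Int),
    (PySem.List.pyRange (res.length : Int) ((res.length : Int) + (suf.length : Int)) 1).foldl
        insertion_binary_sort_stepA (res ++ suf, c, asg)
    = suf.foldl insertion_binary_sort_stepB (res, c, asg) := by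
  intro suf
  induction suf with
  | nil =>
    intro res c asg
    simp
  | cons k suf' ih =>
    intro res c asg
    have hpeel := PySem.List.pyRange_one_cons
      (show (res.length : Int) < (res.length : Int) + ((k :: suf').length : Int) by simp)
    rw [hpeel, List.foldl_cons]
    -- compute one step of A
    have hkey : PySem.List.pyGetD (res ++ k :: suf') (res.length : Int) 0 = k := by
      have := PySem.List.pyGetD_eq_getElem (res ++ k :: suf') (i := (res.length : Int)) 0
        (by omega) (by simp)
      rw [this]
      simp
    have hsearch : binary_searchA (((res.length : Int) - 1).toNat + 2) (res ++ k :: suf') k 0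
          ((res.length : Int) - 1) c
        = bsearch_loop (((res.length : Int) - 1).toNat + 2) res k 0 ((res.length : Int) - 1) c := by
      rw [bsA_eq_bsB]
      exact bsB_append _ res (k :: suf') k 0 _ c (le_refl 0) (by omega)
    set pc := bsearch_loop (((res.length : Int) - 1).toNat + 2) res k 0 ((res.length : Int) - 1) c
      with hpc
    have hbounds := bsB_pos_bounds (((res.length : Int) - 1).toNat + 2) res k 0
      ((res.length : Int) - 1) c (le_refl 0) (by omega)
    rw [← hpc] at hbounds
    have hstepA : insertion_binary_sort_stepA (res ++ k :: suf', c, asg) (res.length : Int)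
        = (PySem.List.insert res pc.1 k ++ suf', pc.2, asg + 1 + ((res.length : Int) - pc.1) + 1) := by
      simp only [insertion_binary_sort_stepA, hkey, hsearch]
      rw [surgery_eq res suf' k pc.1 (by omega) (by omega)]
    rw [hstepA, List.foldl_cons]
    have hstepB : insertion_binary_sort_stepB (res, c, asg) k
        = (PySem.List.insert res pc.1 k, pc.2, asg + 1 + ((res.length : Int) - pc.1) + 1) := by
      simp only [insertion_binary_sort_stepB]
      rw [← hpc]
    rw [hstepB]
    have hlen' : ((PySem.List.insert res pc.1 k).length : Int) = (res.length : Int) + 1 := by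
      have : pc.1 = ((pc.1).toNat : Int) := by omega
      rw [this, PySem.List.insert_natCast res _ k (by omega)]
      simp
    have := ih (PySem.List.insert res pc.1 k) pc.2 (asg + 1 + ((res.length : Int) - pc.1) + 1)
    rw [hlen'] at this
    have harith : (res.length : Int) + ((k :: suf').length : Int)
        = (res.length : Int) + 1 + ((suf' : List Int).length : Int) := by simp; omega
    rw [harith]
    exact this

-- ===== VERDICT (by name: the statement is the Claim_ definition above) =====
theorem insertion_binary_sort_spec : Claim_equal_insertion_binary_sort := by
  unfold Claim_equal_insertion_binary_sort
  intro arr _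
  unfold Spec_insertion_binary_sort
  match arr with
  | [] => rfl
  | x :: rest =>
    rw [insertion_binary_sort, insertion_binary_sort_alt]
    rw [PySem.List.slice_from _ (by norm_num : (0:Int) ≤ 1),
        PySem.List.slice_to _ (by norm_num : (0:Int) ≤ 1)]
    have h := main_loop_eq rest [x] 0 0
    simp only [List.length_singleton, Nat.cast_one] at h
    rw [show ([x] ++ rest : List Int) = x :: rest from rfl] at h
    simp only [Int.toNat_one, List.take_succ_cons, List.take_zero, List.drop_succ_cons,
      List.drop_zero, List.length_cons, Nat.cast_add, Nat.cast_one]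
    rw [add_comm ((rest.length : Int)) 1]
    rw [h]
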